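-- pv_equiv track=rewrite | github.com/nestordemeure/shaman | shaman/tools/shaman_profiler/shaman_profiler.py | remove_template_parameters
-- ===== SOURCE A (Python) =====
-- def remove_template_parameters(name):
--     """returns a function name without the template parameters : fun<T> -> fun"""
--     if name.endswith('>'): # if the name might end with a template
--         template_number = 0
--         for i in reversed(range(len(name))):
--             if name[i] is '>': # we are going inside a template
--                 template_number += 1
--             elif name[i] is '<': # we are going outside a template
--                 template_number -= 1
--                 if template_number == 0: # we went outside the outer template
--                     return name[:i]
--     return name
-- ===== SOURCE B (Python) =====
-- def remove_template_parameters(name):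
--     """returns a function name without the template parameters : fun<T> -> fun"""
--     if name.endswith('>'):  # only then can the name end with a template
--         stack = []   # indices of currently-open '<'
--         last = None  # opener matched with the most recent '>' (None if unmatched)
--         for i, c in enumerate(name):
--             if c == '<':
--                 stack.append(i)
--             elif c == '>':
--                 last = stack.pop() if stack else None
--         if last is not None:
--             return name[:last]
--     return name
-- ===== Notes on version B (the rewrite author's own statement) =====
-- stated objective: alternative
-- what changed: Replaces A's backward scan with an int nesting-depth counter by a single forward scan that pushes each '<' index on a stack and pops it at each '>', then cuts the name at the opener matched with the trailing '>'.
import Mathlib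
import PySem

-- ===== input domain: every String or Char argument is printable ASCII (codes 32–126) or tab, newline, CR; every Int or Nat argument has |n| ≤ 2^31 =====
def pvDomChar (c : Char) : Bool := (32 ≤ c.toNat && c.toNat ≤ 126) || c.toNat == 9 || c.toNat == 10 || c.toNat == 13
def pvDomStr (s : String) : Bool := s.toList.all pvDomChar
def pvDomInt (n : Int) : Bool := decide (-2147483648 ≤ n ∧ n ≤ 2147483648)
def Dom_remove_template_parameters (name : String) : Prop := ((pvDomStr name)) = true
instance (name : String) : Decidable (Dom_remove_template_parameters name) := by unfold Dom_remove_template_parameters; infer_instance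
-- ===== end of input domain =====

-- B replaces A's backward depth-counter scan with a forward scan keeping a stack of '<' indices (objective: alternative decomposition, same cost).

-- ===== PORT A =====
-- A's loop `for i in reversed(range(len(name)))` with the int counter `template_number`:
-- recursion over the reversed character list, carrying the current index i and counter t.
def pvAScan : List Char → Nat → Int → Option Nat
  | [], _, _ => none
  | c :: r, i, t =>
    if c = '>' then pvAScan r (i - 1) (t + 1)
    else if c = '<' then
      (if t - 1 = 0 then some i else pvAScan r (i - 1) (t - 1))
    else pvAScan r (i - 1) t

def remove_template_parameters (name : String) : String :=
  if PySem.Str.endswith name ">" then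
    match pvAScan name.toList.reverse (name.toList.length - 1) 0 with
    | some i => PySem.Str.slice name none (some (i : Int))   -- name[:i]
    | none => name
  else name

-- ===== PORT B =====
-- one step of B's loop body; `(st.tail, st.head?)` is `last = stack.pop() if stack else None`
def pvBStep : (List Int × Option Int) → (Int × Char) → (List Int × Option Int)
  | (st, last), (i, c) =>
    if c = '<' then (i :: st, last)
    else if c = '>' then (st.tail, st.head?)
    else (st, last)

def remove_template_parameters_alt (name : String) : String :=
  if PySem.Str.endswith name ">" then
    let res := (PySem.List.enumerate name.toList 0).foldl pvBStep ([], none)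
    match res.2 with
    | some i => PySem.Str.slice name none (some i)   -- name[:last]
    | none => name
  else name

-- ===== PRECONDITION & SPEC =====
def Spec_remove_template_parameters (name : String) (out : String) : Prop := out = remove_template_parameters_alt name
instance (name : String) (out : String) : Decidable (Spec_remove_template_parameters name out) := by unfold Spec_remove_template_parameters; infer_instance

-- ===== CLAIM (what is proved, stated in full; the proofs are below) =====
def Claim_equal_remove_template_parameters : Prop := ∀ (name : String), Dom_remove_template_parameters name → Spec_remove_template_parameters name (remove_template_parameters name)

-- ===== LEMMAS AND PROOFS =====

-- the stack of open-'<' indices after forward-processing a char list, starting at index i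
def pvStk : List Int → Int → List Char → List Int
  | st, _, [] => st
  | st, i, c :: cs => pvStk (if c = '<' then i :: st else if c = '>' then st.tail else st) (i + 1) cs

lemma pvFoldl_fst (u : List Char) : ∀ (st : List Int) (last : Option Int) (i : Int),
    ((PySem.List.enumerate u i).foldl pvBStep (st, last)).1 = pvStk st i u := by
  induction u with
  | nil => intro st last i; simp [PySem.List.enumerate_nil, pvStk]
  | cons c cs ih =>
    intro st last i
    rw [PySem.List.enumerate_cons]
    simp only [List.foldl_cons, pvBStep, pvStk]
    split_ifs <;> simp [ih]

lemma pvStk_concat (v : List Char) (c : Char) : ∀ (st : List Int) (i : Int),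
    pvStk st i (v ++ [c]) =
      (if c = '<' then (i + v.length) :: pvStk st i v
       else if c = '>' then (pvStk st i v).tail
       else pvStk st i v) := by
  induction v with
  | nil => intro st i; simp [pvStk]
  | cons d ds ih =>
    intro st i
    simp only [List.cons_append, pvStk, ih]
    split_ifs <;> simp <;> ring_nf

-- the backward counter scan at counter k reads off the k-th entry of the forward stack
lemma pvKey : ∀ (u : List Char) (k : Nat), 1 ≤ k →
    (pvAScan u.reverse (u.length - 1) (k : Int)).map Int.ofNat
      = (pvStk [] 0 u)[k - 1]? := by
  intro u
  induction u using List.reverseRecOn with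
  | nil => intro k _; simp [pvAScan, pvStk]
  | append_singleton v c ih =>
    intro k hk
    rw [List.reverse_append, List.reverse_singleton, List.singleton_append,
        (by simp : (v ++ [c]).length - 1 = v.length), pvStk_concat]
    by_cases h1 : c = '>'
    · subst h1
      rw [pvAScan, if_pos rfl,
          (by push_cast; ring : (k : Int) + 1 = ((k + 1 : Nat) : Int)),
          ih (k + 1) (by omega), if_neg (by decide), if_pos rfl]
      rcases pvStk [] 0 v with _ | ⟨a, rest⟩
      · simp
      · rw [(by omega : k + 1 - 1 = (k - 1) + 1), List.getElem?_cons_succ, List.tail_cons]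
    · by_cases h2 : c = '<'
      · subst h2
        rw [pvAScan, if_neg (by decide), if_pos rfl, if_pos rfl]
        by_cases hk1 : k = 1
        · subst hk1
          rw [if_pos (by norm_num)]
          simp
        · rw [if_neg (by omega : ¬ ((k : Int) - 1 = 0)),
              (by omega : (k : Int) - 1 = ((k - 1 : Nat) : Int)),
              ih (k - 1) (by omega), (by omega : k - 1 - 1 = k - 2),
              (by omega : k - 1 = (k - 2) + 1), List.getElem?_cons_succ]
      · rw [pvAScan, if_neg h1, if_neg h2, ih k hk, if_neg h2, if_neg h1]

lemma pvEndswith_decomp (name : String) (h : PySem.Str.endswith name ">" = true) :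
    ∃ u, name.toList = u ++ ['>'] := by
  rw [PySem.Str.endswith_eq, PySem.Chars.endswith_iff] at h
  rcases h with ⟨t, ht⟩
  exact ⟨t, ht.symm⟩

lemma pvMain (name : String) :
    remove_template_parameters name = remove_template_parameters_alt name := by
  unfold remove_template_parameters remove_template_parameters_alt
  by_cases h : PySem.Str.endswith name ">" = true
  · rw [if_pos h, if_pos h]
    obtain ⟨u, hu⟩ := pvEndswith_decomp name h
    -- A side: peel the trailing '>' and apply pvKey at counter 1
    have hA : (pvAScan name.toList.reverse (name.toList.length - 1) 0).map Int.ofNat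
        = (pvStk [] 0 u).head? := by
      rw [hu, List.reverse_append, List.reverse_singleton, List.singleton_append,
          (by simp : (u ++ ['>']).length - 1 = u.length), pvAScan, if_pos rfl,
          (by norm_num : (0 : Int) + 1 = ((1 : Nat) : Int)), pvKey u 1 (by omega)]
      cases pvStk [] 0 u <;> simp
    -- B side: split the foldl at the trailing '>'
    have hB : ((PySem.List.enumerate name.toList 0).foldl pvBStep ([], none)).2
        = (pvStk [] 0 u).head? := by
      rw [hu, PySem.List.enumerate_append, List.foldl_append,
          PySem.List.enumerate_cons, PySem.List.enumerate_nil]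
      simp only [List.foldl_cons, List.foldl_nil]
      have hfst := pvFoldl_fst u ([] : List Int) (none : Option Int) 0
      rcases hfold : (PySem.List.enumerate u 0).foldl pvBStep ([], none) with ⟨st, last⟩
      rw [hfold] at hfst
      simp only at hfst
      simp only [pvBStep, if_neg (by decide : ¬ ('>' = '<')), hfst]
      simp
    rcases hsc : pvAScan name.toList.reverse (name.toList.length - 1) 0 with _ | i <;>
      rw [hsc] at hA <;> simp only [Option.map_none, Option.map_some] at hA <;>
      rw [← hA] at hB <;> simp [hB]
  · rw [if_neg h, if_neg h]

-- ===== VERDICT (by name: the statement is the Claim_ definition above) =====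
theorem remove_template_parameters_spec : Claim_equal_remove_template_parameters := by
  intro name _
  unfold Spec_remove_template_parameters
  exact pvMain name
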